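-- pv_equiv track=rewrite | github.com/Siya26/DASS-Course-Allocation | add_drop/final.py | findDisjointCycles
-- ===== SOURCE A (Python) =====
-- def findDisjointCycles(cycles,disjoint_edges):
--
--     disjoint_cycles = []
--     for sublist in cycles:
--         duplicated_sublist = sublist.copy()
--         disjoint_cycles.append(duplicated_sublist)
--
--     for cycle in cycles:
--         length = len(cycle)
--
--         for i in range(1,length):
--             if((cycle[i-1],cycle[i]) in disjoint_edges) :
--                 disjoint_cycles.remove(cycle)       # removing the set of cycles with common edges
--                 break
--
--         if(cycle in disjoint_cycles):
--             if((cycle[length-1],cycle[0]) in disjoint_edges) :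
--                 disjoint_cycles.remove(cycle)
--
--     return disjoint_cycles
-- ===== SOURCE B (Python) =====
-- def findDisjointCycles(cycles, disjoint_edges):
--     def bad(c):
--         return any(p in disjoint_edges for p in zip(c, c[1:] + c[:1]))
--     return [c[:] for c in cycles if not bad(c)]
-- ===== Notes on version B (the rewrite author's own statement) =====
-- stated objective: simpler
-- what changed: B is a direct one-pass filter that tests each cycle's consecutive pairs (including the wrap pair) via zip with the rotated list, instead of A's copy-all-then-remove scheme with an index loop, a break, a membership re-check and list.remove calls.
-- outside the precondition, e.g. on findDisjointCycles([[]], set()): A raises IndexError, B returns [[]]; on findDisjointCycles([[1, 2], [1, 2]], {(1, 2), (2, 1)}): A raises ValueError, B returns []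
-- crash fix: A raises IndexError when some cycle is empty, and ValueError (list.remove on a missing element) when a cycle value occurring at least twice has both an inner edge and the wrap edge in disjoint_edges; B simply keeps or drops such cycles by the same edge test and returns a list. — e.g. on findDisjointCycles([[1, 2], [1, 2]], [(1, 2), (2, 1)]): A raises ValueError, B returns []
import Mathlib
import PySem

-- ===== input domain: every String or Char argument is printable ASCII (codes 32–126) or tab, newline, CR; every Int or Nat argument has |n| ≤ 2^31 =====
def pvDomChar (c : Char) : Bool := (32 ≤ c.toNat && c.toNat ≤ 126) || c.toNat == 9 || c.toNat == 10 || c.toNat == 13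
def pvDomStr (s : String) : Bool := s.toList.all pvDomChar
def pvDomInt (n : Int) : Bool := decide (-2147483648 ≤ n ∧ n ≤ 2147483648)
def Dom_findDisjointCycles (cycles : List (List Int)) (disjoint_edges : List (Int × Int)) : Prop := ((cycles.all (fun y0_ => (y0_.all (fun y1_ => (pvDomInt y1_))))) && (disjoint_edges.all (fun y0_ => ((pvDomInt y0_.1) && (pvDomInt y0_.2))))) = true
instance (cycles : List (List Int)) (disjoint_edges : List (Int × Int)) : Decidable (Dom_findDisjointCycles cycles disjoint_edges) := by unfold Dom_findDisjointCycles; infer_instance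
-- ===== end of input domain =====

-- B replaces A's copy-all-then-remove scheme by a direct one-pass filter (simpler); equivalence is about return values (neither mutates its arguments).

-- ===== PORT A =====
-- inner 'for i in range(1, length)' loop with its break: removes the first copy of
-- `cycle` at the first i whose edge (cycle[i-1], cycle[i]) is in disjoint_edges
def aInnerLoop (cycle : List Int) (disjoint_edges : List (Int × Int)) (dc : List (List Int)) : List Int → List (List Int)
  | [] => dc
  | i :: rest =>
    if ((PySem.List.pyGet? cycle (i-1)).getD 0, (PySem.List.pyGet? cycle i).getD 0) ∈ disjoint_edges then
      (PySem.List.remove? dc cycle).getD dc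
    else aInnerLoop cycle disjoint_edges dc rest

def findDisjointCycles (cycles : List (List Int)) (disjoint_edges : List (Int × Int)) : List (List Int) :=
  let disjoint_cycles := cycles.foldl (fun acc sublist => acc ++ [sublist]) []
  cycles.foldl (fun dc cycle =>
    let length : Int := (cycle.length : Int)
    let dc := aInnerLoop cycle disjoint_edges dc (PySem.List.pyRange 1 length 1)
    if cycle ∈ dc then
      if ((PySem.List.pyGet? cycle (length-1)).getD 0, (PySem.List.pyGet? cycle 0).getD 0) ∈ disjoint_edges then
        (PySem.List.remove? dc cycle).getD dc
      else dc
    else dc) disjoint_cycles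

-- ===== PORT B =====
-- bad(c): any consecutive pair of c (including the wrap pair), from zip(c, c[1:] + c[:1])
def altBad (disjoint_edges : List (Int × Int)) (c : List Int) : Bool :=
  (c.zip (PySem.List.slice c (some 1) none ++ PySem.List.slice c none (some 1))).any
    (fun p => p ∈ disjoint_edges)

def findDisjointCycles_alt (cycles : List (List Int)) (disjoint_edges : List (Int × Int)) : List (List Int) :=
  cycles.filter (fun c => !(altBad disjoint_edges c))

-- ===== PRECONDITION & SPEC =====
-- proof-level edge predicates (independent of both ports)
def innerBadP (disjoint_edges : List (Int × Int)) (c : List Int) : Bool :=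
  (c.zip (c.drop 1)).any (fun p => p ∈ disjoint_edges)
def wrapBadP (disjoint_edges : List (Int × Int)) (c : List Int) : Bool :=
  match c.getLast?, c.head? with
  | some a, some b => decide ((a, b) ∈ disjoint_edges)
  | _, _ => false

-- Pre_ excludes exactly the inputs on which A raises: an empty cycle (IndexError at
-- cycle[length-1]), or a cycle value occurring at least twice that has both an inner
-- edge and the wrap edge in disjoint_edges (its first occurrence removes two copies,
-- so a later occurrence's list.remove raises ValueError).
def Pre_findDisjointCycles (cycles : List (List Int)) (disjoint_edges : List (Int × Int)) : Prop :=
  ([] : List Int) ∉ cycles ∧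
  ∀ c ∈ cycles, innerBadP disjoint_edges c = true → wrapBadP disjoint_edges c = true → cycles.count c ≤ 1
instance (cycles : List (List Int)) (disjoint_edges : List (Int × Int)) : Decidable (Pre_findDisjointCycles cycles disjoint_edges) := by unfold Pre_findDisjointCycles; infer_instance

def pvWitness_findDisjointCycles : List (List Int) × (List (Int × Int)) := ([[1, 2], [3, 4]], [(1, 2)])

-- A raises (IndexError or ValueError, as above) exactly on these inputs; B's edge test is total and returns the filtered list there.
def Raises_findDisjointCycles (cycles : List (List Int)) (disjoint_edges : List (Int × Int)) : Prop :=
  ([] : List Int) ∈ cycles ∨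
  ∃ c ∈ cycles, innerBadP disjoint_edges c = true ∧ wrapBadP disjoint_edges c = true ∧ 2 ≤ cycles.count c
instance (cycles : List (List Int)) (disjoint_edges : List (Int × Int)) : Decidable (Raises_findDisjointCycles cycles disjoint_edges) := by unfold Raises_findDisjointCycles; infer_instance
def pvRaiseWitness_findDisjointCycles : List (List Int) × (List (Int × Int)) := ([[1, 2], [1, 2]], [(1, 2), (2, 1)])
def pvRaiseWitnessOut_findDisjointCycles : List (List Int) := []

def Spec_findDisjointCycles (cycles : List (List Int)) (disjoint_edges : List (Int × Int)) (out : List (List Int)) : Prop := out = findDisjointCycles_alt cycles disjoint_edges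
instance (cycles : List (List Int)) (disjoint_edges : List (Int × Int)) (out : List (List Int)) : Decidable (Spec_findDisjointCycles cycles disjoint_edges out) := by unfold Spec_findDisjointCycles; infer_instance

-- ===== CLAIM (what is proved, stated in full; the proofs are below) =====
def Claim_equal_findDisjointCycles : Prop := ∀ (cycles : List (List Int)) (disjoint_edges : List (Int × Int)), Dom_findDisjointCycles cycles disjoint_edges → Pre_findDisjointCycles cycles disjoint_edges → Spec_findDisjointCycles cycles disjoint_edges (findDisjointCycles cycles disjoint_edges)
def Claim_raises_findDisjointCycles : Prop := (∀ (cycles : List (List Int)) (disjoint_edges : List (Int × Int)), Dom_findDisjointCycles cycles disjoint_edges → Raises_findDisjointCycles cycles disjoint_edges → ¬ Pre_findDisjointCycles cycles disjoint_edges) ∧ (Dom_findDisjointCycles (pvRaiseWitness_findDisjointCycles.1) (pvRaiseWitness_findDisjointCycles.2) ∧ Raises_findDisjointCycles (pvRaiseWitness_findDisjointCycles.1) (pvRaiseWitness_findDisjointCycles.2) ∧ findDisjointCycles_alt (pvRaiseWitness_findDisjointCycles.1) (pvRaiseWitness_findDisjointCycles.2) = pvRaiseWitnessOut_findDisjoi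ntCycles)

-- ===== LEMMAS AND PROOFS =====

theorem aInnerLoop_eq (cycle : List Int) (de : List (Int × Int)) (dc : List (List Int)) (is : List Int) :
    aInnerLoop cycle de dc is =
      if is.any (fun i => decide (((PySem.List.pyGet? cycle (i-1)).getD 0, (PySem.List.pyGet? cycle i).getD 0) ∈ de)) then
        (PySem.List.remove? dc cycle).getD dc
      else dc := by
  induction is with
  | nil => simp [aInnerLoop]
  | cons i rest ih =>
    simp only [aInnerLoop, List.any_cons]
    by_cases h : ((PySem.List.pyGet? cycle (i-1)).getD 0, (PySem.List.pyGet? cycle i).getD 0) ∈ de <;>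
      simp [h, ih]

-- A's index-loop edge test equals the zip-with-tail test
-- A's index-loop edge test equals the zip-with-tail test
theorem aInner_eq_innerBadP (de : List (Int × Int)) (xs : List Int) :
    (PySem.List.pyRange 1 (xs.length : Int) 1).any
        (fun i => decide (((PySem.List.pyGet? xs (i-1)).getD 0, (PySem.List.pyGet? xs i).getD 0) ∈ de))
      = innerBadP de xs := by
  simp only [innerBadP]
  rw [Bool.eq_iff_iff]
  simp only [List.any_eq_true]
  constructor
  · rintro ⟨i, hi, hp⟩
    rw [PySem.List.mem_pyRange_one] at hi
    obtain ⟨h1, h2⟩ := hi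
    obtain ⟨j, rfl⟩ : ∃ j : ℕ, i = (j : ℤ) := ⟨i.toNat, by omega⟩
    have hj1 : 1 ≤ j := by omega
    have hj2 : j < xs.length := by omega
    have hcast : (j : ℤ) - 1 = ((j - 1 : ℕ) : ℤ) := by omega
    rw [hcast, PySem.List.pyGet?_natCast, PySem.List.pyGet?_natCast] at hp
    rw [List.getElem?_eq_getElem (by omega : j - 1 < xs.length),
        List.getElem?_eq_getElem hj2] at hp
    simp only [Option.getD_some, decide_eq_true_eq] at hp
    refine ⟨(xs[j-1]'(by omega), xs[j]'hj2), ?_, by simpa using hp⟩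
    rw [List.mem_iff_getElem]
    refine ⟨j - 1, by simp; omega, ?_⟩
    rw [List.getElem_zip]
    congr 1
    rw [List.getElem_drop]
    congr 1
    omega
  · rintro ⟨p, hp, hm⟩
    rw [List.mem_iff_getElem] at hp
    obtain ⟨j, hj, hpe⟩ := hp
    simp only [List.length_zip, List.length_drop] at hj
    have hjc : j + 1 < xs.length := by omega
    refine ⟨((j + 1 : ℕ) : ℤ), ?_, ?_⟩
    · rw [PySem.List.mem_pyRange_one]
      constructor <;> [omega; exact_mod_cast hjc]
    · have hcast : ((j + 1 : ℕ) : ℤ) - 1 = ((j : ℕ) : ℤ) := by omega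
      rw [hcast, PySem.List.pyGet?_natCast, PySem.List.pyGet?_natCast]
      rw [List.getElem?_eq_getElem (by omega : j < xs.length),
          List.getElem?_eq_getElem hjc]
      rw [List.getElem_zip] at hpe
      simp only [List.getElem_drop] at hpe
      simp only [Option.getD_some, decide_eq_true_eq]
      rw [← hpe] at hm
      simpa [Nat.add_comm 1 j] using hm

-- A's wrap pair equals the getLast?/head? test, for nonempty c
theorem aWrap_eq_wrapBadP (de : List (Int × Int)) (c : List Int) (hc : c ≠ []) :
    decide (((PySem.List.pyGet? c ((c.length : Int) - 1)).getD 0, (PySem.List.pyGet? c 0).getD 0) ∈ de)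
      = wrapBadP de c := by
  have hlen : 0 < c.length := List.length_pos_of_ne_nil hc
  have hcast : (c.length : ℤ) - 1 = ((c.length - 1 : ℕ) : ℤ) := by omega
  have h0 : (0 : ℤ) = ((0 : ℕ) : ℤ) := rfl
  rw [hcast, h0, PySem.List.pyGet?_natCast, PySem.List.pyGet?_natCast]
  rw [List.getElem?_eq_getElem (by omega : c.length - 1 < c.length),
      List.getElem?_eq_getElem hlen]
  unfold wrapBadP
  rw [List.getLast?_eq_getElem?, List.head?_eq_getElem?]
  rw [List.getElem?_eq_getElem (by omega : c.length - 1 < c.length),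
      List.getElem?_eq_getElem hlen]
  simp

-- rotated-zip decomposition: zip(a::t, t ++ [z]) appends the pair (last, z)
theorem zip_rot (t : List Int) : ∀ (a z : Int),
    (a :: t).zip (t ++ [z]) = (a :: t).zip t ++ [(t.getLastD a, z)] := by
  induction t with
  | nil => intro a z; simp
  | cons b t' ih =>
    intro a z
    simp only [List.cons_append, List.zip_cons_cons, ih b z, List.getLastD_cons]

theorem altBad_eq (de : List (Int × Int)) (c : List Int) :
    altBad de c = (innerBadP de c || wrapBadP de c) := by
  cases c with
  | nil => simp [altBad, innerBadP, wrapBadP, PySem.List.slice]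
  | cons a t =>
    unfold altBad innerBadP wrapBadP
    rw [PySem.List.slice_from_one, PySem.List.slice_to _ (by norm_num)]
    simp only [List.tail_cons, Int.toNat_one, List.take_succ_cons, List.take_zero,
      List.drop_succ_cons, List.drop_zero]
    rw [zip_rot t a a, List.any_append]
    simp [List.getLast?_cons]

-- the initial copy loop builds the same list
theorem copy_fold_eq (l : List (List Int)) :
    l.foldl (fun acc sublist => acc ++ [sublist]) [] = l := by
  have h : ∀ (l acc : List (List Int)), l.foldl (fun acc sublist => acc ++ [sublist]) acc = acc ++ l := by
    intro l
    induction l with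
    | nil => simp
    | cons x xs ih => intro acc; simp [List.foldl_cons, ih]
  simpa using h l []

-- the main loop invariant: with the state pre ++ l (pre = already-kept cycles, all good;
-- l = remaining cycles), A's second loop produces pre ++ (l filtered by the edge test)
theorem main_invariant (de : List (Int × Int)) :
    ∀ (l pre : List (List Int)),
      (∀ x ∈ pre, (innerBadP de x || wrapBadP de x) = false) →
      ([] : List Int) ∉ l →
      (∀ c ∈ l, innerBadP de c = true → wrapBadP de c = true → l.count c ≤ 1) →
      l.foldl (fun dc cycle =>
        let length : Int := (cycle.length : Int)
        let dc := aInnerLoop cycle de dc (PySem.List.pyRange 1 length 1)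
        if cycle ∈ dc then
          if ((PySem.List.pyGet? cycle (length-1)).getD 0, (PySem.List.pyGet? cycle 0).getD 0) ∈ de then
            (PySem.List.remove? dc cycle).getD dc
          else dc
        else dc) (pre ++ l)
      = pre ++ l.filter (fun c => !(innerBadP de c || wrapBadP de c)) := by
  intro l
  induction l with
  | nil => intro pre _ _ _; simp
  | cons c l' ih =>
    intro pre hpre hne hcnt
    have hcnil : c ≠ [] := fun h => hne (h ▸ List.mem_cons_self)
    have hcpre : (innerBadP de c || wrapBadP de c) = true → c ∉ pre := by
      intro hbad hcp
      rw [hpre c hcp] at hbad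
      exact Bool.false_ne_true hbad
    simp only [List.foldl_cons]
    rw [aInnerLoop_eq, aInner_eq_innerBadP]
    have hwrap := aWrap_eq_wrapBadP de c hcnil
    by_cases hib : innerBadP de c = true
    · -- inner-loop remove fires
      have hcnp : c ∉ pre := hcpre (by simp [hib])
      have hmem : c ∈ pre ++ c :: l' := by simp
      rw [if_pos hib, PySem.List.remove?_eq_some_erase _ _ hmem, Option.getD_some,
          List.erase_append_right _ (fun h => hcnp (by simpa using h)), List.erase_cons_head]
      have hnotin2 : wrapBadP de c = true → c ∉ pre ++ l' := by
        intro hwb hcm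
        rcases List.mem_append.mp hcm with h | h
        · exact hcnp h
        · have := hcnt c List.mem_cons_self hib hwb
          rw [List.count_cons_self] at this
          have := List.count_pos_iff.mpr h
          omega
      have hstep : (if c ∈ pre ++ l' then
          if ((PySem.List.pyGet? c ((c.length : Int)-1)).getD 0, (PySem.List.pyGet? c 0).getD 0) ∈ de then
            (PySem.List.remove? (pre ++ l') c).getD (pre ++ l')
          else pre ++ l'
        else pre ++ l') = pre ++ l' := by
        by_cases hm : c ∈ pre ++ l'
        · rw [if_pos hm]
          by_cases hwb : wrapBadP de c = true
          · exact absurd hm (hnotin2 hwb)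
          · rw [if_neg (of_decide_eq_false (by rw [hwrap]; simpa using hwb))]
        · rw [if_neg hm]
      simp only at hstep ⊢
      rw [hstep]
      rw [ih pre hpre (fun h => hne (List.mem_cons_of_mem _ h))
        (fun d hd h1 h2 => by
          have := hcnt d (List.mem_cons_of_mem _ hd) h1 h2
          have hle : l'.count d ≤ (c :: l').count d := by
            rw [List.count_cons]; omega
          omega)]
      rw [List.filter_cons, if_neg (by simp [hib])]
    · -- no inner remove
      rw [if_neg hib]
      have hmem : c ∈ pre ++ c :: l' := by simp
      rw [if_pos hmem]
      by_cases hwb : wrapBadP de c = true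
      · rw [if_pos (of_decide_eq_true (by rw [hwrap]; exact hwb))]
        have hcnp : c ∉ pre := hcpre (by simp [hwb])
        rw [PySem.List.remove?_eq_some_erase _ _ hmem, Option.getD_some,
            List.erase_append_right _ (fun h => hcnp (by simpa using h)), List.erase_cons_head]
        rw [ih pre hpre (fun h => hne (List.mem_cons_of_mem _ h))
          (fun d hd h1 h2 =>
            (by have := hcnt d (List.mem_cons_of_mem _ hd) h1 h2
                have hle : l'.count d ≤ (c :: l').count d := by
                  rw [List.count_cons]; omega
                omega))]
        rw [List.filter_cons, if_neg (by simp [hwb])]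
      · rw [if_neg (of_decide_eq_false (by rw [hwrap]; simpa using hwb))]
        have hrw : pre ++ c :: l' = (pre ++ [c]) ++ l' := by simp
        rw [hrw]
        rw [ih (pre ++ [c])
          (by intro x hx
              rcases List.mem_append.mp hx with h | h
              · exact hpre x h
              · simp only [List.mem_singleton] at h
                subst h
                rw [Bool.or_eq_false_iff]
                exact ⟨by simpa using hib, by simpa using hwb⟩)
          (fun h => hne (List.mem_cons_of_mem _ h))
          (fun d hd h1 h2 =>
            (by have := hcnt d (List.mem_cons_of_mem _ hd) h1 h2
                have hle : l'.count d ≤ (c :: l').count d := by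
                  rw [List.count_cons]; omega
                omega))]
        rw [List.filter_cons, if_pos (by simp [hib, hwb])]
        simp

-- ===== VERDICT (by name: the statement is the Claim_ definition above) =====
theorem findDisjointCycles_spec : Claim_equal_findDisjointCycles := by
  intro cycles de _ hpre
  obtain ⟨hne, hcnt⟩ := hpre
  unfold Spec_findDisjointCycles findDisjointCycles findDisjointCycles_alt
  simp only [copy_fold_eq]
  have h := main_invariant de cycles [] (by simp) hne hcnt
  simp only [List.nil_append] at h
  have hfe : (fun c => !altBad de c) = (fun c => !(innerBadP de c || wrapBadP de c)) :=
    funext fun c => by rw [altBad_eq]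
  rw [hfe]
  exact h

theorem findDisjointCycles_raises : Claim_raises_findDisjointCycles := by
  unfold Claim_raises_findDisjointCycles
  refine ⟨?_, by decide⟩
  intro cycles de _ hr hpre
  obtain ⟨hne, hcnt⟩ := hpre
  rcases hr with h | ⟨c, hc, h1, h2, h3⟩
  · exact hne h
  · have := hcnt c hc h1 h2
    omega

-- witness self-check: B's port really returns the stated literal at the raise witness
theorem pvRaiseWitness_findDisjointCycles_ok :
    findDisjointCycles_alt pvRaiseWitness_findDisjointCycles.1 pvRaiseWitness_findDisjointCycles.2
      = pvRaiseWitnessOut_findDisjointCycles :=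
  findDisjointCycles_raises.2.2.2
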